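-- pv_equiv track=rewrite | github.com/BugTraceAI/BugTraceAI-CLI | bugtrace/agents/shared/discovery.py | prioritize_params
-- ===== SOURCE A (Python) =====
-- from typing import Any, Dict, FrozenSet, List, Optional, Set, Tuple
--
-- def prioritize_params(
--     params: List[str],
--     high_priority: Optional[List[str]] = None,
--     medium_priority: Optional[List[str]] = None,
-- ) -> List[str]:
--     """
--     Sort parameters by likelihood of vulnerability.
--
--     Parameters whose names match high-priority keywords come first,
--     then medium-priority, then the rest.
--
--     Pure function.
--
--     Args:
--         params: List of parameter names to sort.
--         high_priority: Keywords that indicate high likelihood of injection.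
--                        Match is case-insensitive substring (either direction).
--                        If None, a generic default set is used.
--         medium_priority: Keywords for medium likelihood.
--                          If None, a generic default set is used.
--
--     Returns:
--         Sorted list of parameter names (high -> medium -> low priority).
--     """
--     if high_priority is None:
--         high_priority = [
--             "id", "user_id", "userid", "product_id", "productid",
--             "item_id", "itemid", "order_id", "orderid",
--             "search", "q", "query", "filter", "keyword", "term",
--             "sort", "order", "orderby", "sortby",
--             "name", "title", "type", "action", "view",
--             "file", "path", "template", "page", "document",
--             "username", "user", "email", "login",
--         ]
--     if medium_priority is None:
--         medium_priority = [
--             "date", "from", "to", "start", "end",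
--             "price", "amount", "qty", "quantity",
--             "lang", "language", "locale",
--             "format", "output", "theme", "style",
--         ]
--
--     high: List[str] = []
--     medium: List[str] = []
--     low: List[str] = []
--
--     for param in params:
--         param_lower = (param or "").lower()
--
--         is_high = any(
--             hp == param_lower or hp in param_lower or param_lower in hp
--             for hp in high_priority
--         )
--         is_medium = any(
--             mp == param_lower or mp in param_lower
--             for mp in medium_priority
--         )
--
--         if is_high:
--             high.append(param)
--         elif is_medium:
--             medium.append(param)
--         else:
--             low.append(param)
--
--     return high + medium + low
-- ===== SOURCE B (Python) =====
-- def prioritize_params(params, high_priority=None, medium_priority=None):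
--     if high_priority is None:
--         high_priority = [
--             "id", "user_id", "userid", "product_id", "productid",
--             "item_id", "itemid", "order_id", "orderid",
--             "search", "q", "query", "filter", "keyword", "term",
--             "sort", "order", "orderby", "sortby",
--             "name", "title", "type", "action", "view",
--             "file", "path", "template", "page", "document",
--             "username", "user", "email", "login",
--         ]
--     if medium_priority is None:
--         medium_priority = [
--             "date", "from", "to", "start", "end",
--             "price", "amount", "qty", "quantity",
--             "lang", "language", "locale",
--             "format", "output", "theme", "style",
--         ]
--
--     def priority(param):
--         pl = (param or "").lower()
--         if any(hp == pl or hp in pl or pl in hp for hp in high_priority):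
--             return 0
--         if any(mp == pl or mp in pl for mp in medium_priority):
--             return 1
--         return 2
--
--     return sorted(params, key=priority)
-- ===== Notes on version B (the rewrite author's own statement) =====
-- stated objective: idiomatic
-- what changed: Replaced the single-pass three-bucket partition-and-concatenate loop with a priority-key helper and one stable sorted(params, key=priority) call, relying on sort stability to preserve relative order within each class.
import Mathlib
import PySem

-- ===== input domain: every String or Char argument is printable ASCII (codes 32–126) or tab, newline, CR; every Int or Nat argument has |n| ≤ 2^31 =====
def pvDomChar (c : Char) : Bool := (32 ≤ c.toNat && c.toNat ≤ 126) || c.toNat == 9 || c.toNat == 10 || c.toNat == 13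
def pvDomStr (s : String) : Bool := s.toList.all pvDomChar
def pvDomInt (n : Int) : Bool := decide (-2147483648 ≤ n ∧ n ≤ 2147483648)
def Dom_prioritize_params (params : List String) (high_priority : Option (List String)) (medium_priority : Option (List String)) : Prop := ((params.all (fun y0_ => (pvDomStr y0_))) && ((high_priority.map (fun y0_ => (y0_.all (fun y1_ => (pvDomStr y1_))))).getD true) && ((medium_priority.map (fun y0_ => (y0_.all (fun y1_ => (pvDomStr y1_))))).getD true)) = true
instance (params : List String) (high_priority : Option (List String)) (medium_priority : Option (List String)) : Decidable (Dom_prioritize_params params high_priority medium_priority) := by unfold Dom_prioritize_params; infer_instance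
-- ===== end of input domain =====

-- A partitions params into high/medium/low buckets in one pass and concatenates;
-- B computes a 0/1/2 priority key with the same tests and does one stable sort by it (idiomatic rewrite, same results).


-- default keyword lists (shared literal data of both Python versions)
def pvDefaultHigh : List String :=
  ["id", "user_id", "userid", "product_id", "productid",
   "item_id", "itemid", "order_id", "orderid",
   "search", "q", "query", "filter", "keyword", "term",
   "sort", "order", "orderby", "sortby",
   "name", "title", "type", "action", "view",
   "file", "path", "template", "page", "document",
   "username", "user", "email", "login"]
def pvDefaultMedium : List String :=
  ["date", "from", "to", "start", "end",
   "price", "amount", "qty", "quantity",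
   "lang", "language", "locale",
   "format", "output", "theme", "style"]

-- ===== PORT A =====
-- one pass over params, appending each param to one of three buckets, then high ++ medium ++ low.
-- '(param or "").lower()' : on a String argument, 'param or ""' is param itself (empty stays empty), so it is lower(param).
def prioritize_params (params : List String) (high_priority : Option (List String)) (medium_priority : Option (List String)) : List String :=
  let hps := high_priority.getD pvDefaultHigh
  let mps := medium_priority.getD pvDefaultMedium
  let r := params.foldl
    (fun (acc : List String × List String × List String) param =>
      let pl := PySem.Str.lower param
      let is_high := hps.any (fun hp => hp == pl || PySem.Str.isIn hp pl || PySem.Str.isIn pl hp)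
      let is_medium := mps.any (fun mp => mp == pl || PySem.Str.isIn mp pl)
      if is_high then (acc.1 ++ [param], acc.2.1, acc.2.2)
      else if is_medium then (acc.1, acc.2.1 ++ [param], acc.2.2)
      else (acc.1, acc.2.1, acc.2.2 ++ [param]))
    ([], [], [])
  r.1 ++ r.2.1 ++ r.2.2

-- ===== PORT B =====
-- B's priority helper: 0 = high match, 1 = medium match, 2 = rest (same tests as A)
def pvPriority (hps : List String) (mps : List String) (param : String) : Int :=
  let pl := PySem.Str.lower param
  if hps.any (fun hp => hp == pl || PySem.Str.isIn hp pl || PySem.Str.isIn pl hp) then 0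
  else if mps.any (fun mp => mp == pl || PySem.Str.isIn mp pl) then 1
  else 2

def prioritize_params_alt (params : List String) (high_priority : Option (List String)) (medium_priority : Option (List String)) : List String :=
  let hps := high_priority.getD pvDefaultHigh
  let mps := medium_priority.getD pvDefaultMedium
  PySem.List.sorted params (pvPriority hps mps) false

-- ===== PRECONDITION & SPEC =====
def Spec_prioritize_params (params : List String) (high_priority : Option (List String)) (medium_priority : Option (List String)) (out : List String) : Prop := out = prioritize_params_alt params high_priority medium_priority
instance (params : List String) (high_priority : Option (List String)) (medium_priority : Option (List String)) (out : List String) : Decidable (Spec_prioritize_params params high_priority medium_priority out) := by unfold Spec_prioritize_params; infer_instance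

-- ===== CLAIM (what is proved, stated in full; the proofs are below) =====
def Claim_equal_prioritize_params : Prop := ∀ (params : List String) (high_priority : Option (List String)) (medium_priority : Option (List String)), Dom_prioritize_params params high_priority medium_priority → Spec_prioritize_params params high_priority medium_priority (prioritize_params params high_priority medium_priority)

-- ===== LEMMAS AND PROOFS =====

-- pvPriority only takes the values 0, 1, 2
theorem pvPriority_cases (hps mps : List String) (x : String) :
    pvPriority hps mps x = 0 ∨ pvPriority hps mps x = 1 ∨ pvPriority hps mps x = 2 := by
  unfold pvPriority; simp only []; split_ifs <;> simp

-- inserting x after everything not above it and before everything above it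
theorem insertBy_middle {α : Type} (k : α → Int) (x : α) (ys zs : List α)
    (h1 : ∀ y ∈ ys, ¬ k x < k y) (h2 : ∀ z ∈ zs, k x < k z) :
    PySem.List.insertBy (fun a b => decide (k a < k b)) x (ys ++ zs) = ys ++ x :: zs := by
  induction ys with
  | nil =>
    cases zs with
    | nil => rfl
    | cons z zs => simp [PySem.List.insertBy, h2 z (by simp)]
  | cons y ys ih =>
    have hy : ¬ k x < k y := h1 y (by simp)
    have ih' := ih (fun a ha => h1 a (List.mem_cons_of_mem _ ha))
    simp only [List.cons_append, PySem.List.insertBy]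
    rw [if_neg (by simpa using hy), ih']

-- the foldl underlying PySem.List.sorted keeps the three priority classes together, in order
theorem foldl_insert_classes (k : String → Int)
    (hk : ∀ x, k x = 0 ∨ k x = 1 ∨ k x = 2)
    (xs a0 a1 a2 : List String)
    (h0 : ∀ y ∈ a0, k y = 0) (h1 : ∀ y ∈ a1, k y = 1) (h2 : ∀ y ∈ a2, k y = 2) :
    xs.foldl (fun acc x => PySem.List.insertBy (fun a b => decide (k a < k b)) x acc) (a0 ++ a1 ++ a2)
      = (a0 ++ xs.filter (fun p => decide (k p = 0)))
        ++ (a1 ++ xs.filter (fun p => decide (k p = 1)))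
        ++ (a2 ++ xs.filter (fun p => decide (k p = 2))) := by
  induction xs generalizing a0 a1 a2 with
  | nil => simp
  | cons x xs ih =>
    simp only [List.foldl_cons]
    rcases hk x with hx | hx | hx
    · have : PySem.List.insertBy (fun a b => decide (k a < k b)) x (a0 ++ a1 ++ a2)
          = (a0 ++ [x]) ++ a1 ++ a2 := by
        rw [List.append_assoc]
        rw [insertBy_middle k x a0 (a1 ++ a2)
          (fun y hy => by rw [h0 y hy, hx]; omega)
          (fun z hz => by
            rcases List.mem_append.mp hz with h | h
            · rw [h1 z h, hx]; omega
            · rw [h2 z h, hx]; omega)]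
        simp
      rw [this, ih (a0 ++ [x]) a1 a2
        (fun y hy => by rcases List.mem_append.mp hy with h | h
                        · exact h0 y h
                        · simp at h; subst h; exact hx) h1 h2]
      simp [hx]
    · have : PySem.List.insertBy (fun a b => decide (k a < k b)) x (a0 ++ a1 ++ a2)
          = a0 ++ (a1 ++ [x]) ++ a2 := by
        rw [insertBy_middle k x (a0 ++ a1) a2
          (fun y hy => by
            rcases List.mem_append.mp hy with h | h
            · rw [h0 y h, hx]; omega
            · rw [h1 y h, hx]; omega)
          (fun z hz => by rw [h2 z hz, hx]; omega)]
        simp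
      rw [this, ih a0 (a1 ++ [x]) a2 h0
        (fun y hy => by rcases List.mem_append.mp hy with h | h
                        · exact h1 y h
                        · simp at h; subst h; exact hx) h2]
      simp [hx]
    · have : PySem.List.insertBy (fun a b => decide (k a < k b)) x (a0 ++ a1 ++ a2)
          = a0 ++ a1 ++ (a2 ++ [x]) := by
        rw [show a0 ++ a1 ++ a2 = (a0 ++ a1 ++ a2) ++ ([] : List String) by simp]
        rw [insertBy_middle k x (a0 ++ a1 ++ a2) []
          (fun y hy => by
            rcases List.mem_append.mp hy with h | h
            · rcases List.mem_append.mp h with h' | h'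
              · rw [h0 y h', hx]; omega
              · rw [h1 y h', hx]; omega
            · rw [h2 y h, hx]; omega)
          (fun z hz => by simp at hz)]
        simp
      rw [this, ih a0 a1 (a2 ++ [x]) h0 h1
        (fun y hy => by rcases List.mem_append.mp hy with h | h
                        · exact h2 y h
                        · simp at h; subst h; exact hx)]
      simp [hx]

-- B = the three filters, concatenated
theorem alt_eq_filters (params : List String) (hp mp : Option (List String)) :
    prioritize_params_alt params hp mp
      = params.filter (fun p => decide (pvPriority (hp.getD pvDefaultHigh) (mp.getD pvDefaultMedium) p = 0))
        ++ params.filter (fun p => decide (pvPriority (hp.getD pvDefaultHigh) (mp.getD pvDefaultMedium) p = 1))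
        ++ params.filter (fun p => decide (pvPriority (hp.getD pvDefaultHigh) (mp.getD pvDefaultMedium) p = 2)) := by
  unfold prioritize_params_alt PySem.List.sorted
  simpa using foldl_insert_classes (pvPriority (hp.getD pvDefaultHigh) (mp.getD pvDefaultMedium))
    (pvPriority_cases _ _) params [] [] [] (by simp) (by simp) (by simp)

-- A's bucket fold, with arbitrary starting buckets, computes the three filters
theorem foldl_buckets (hps mps : List String) (xs h m l : List String) :
    xs.foldl
      (fun (acc : List String × List String × List String) param =>
        let pl := PySem.Str.lower param
        let is_high := hps.any (fun hp => hp == pl || PySem.Str.isIn hp pl || PySem.Str.isIn pl hp)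
        let is_medium := mps.any (fun mp => mp == pl || PySem.Str.isIn mp pl)
        if is_high then (acc.1 ++ [param], acc.2.1, acc.2.2)
        else if is_medium then (acc.1, acc.2.1 ++ [param], acc.2.2)
        else (acc.1, acc.2.1, acc.2.2 ++ [param]))
      (h, m, l)
      = (h ++ xs.filter (fun p => decide (pvPriority hps mps p = 0)),
         m ++ xs.filter (fun p => decide (pvPriority hps mps p = 1)),
         l ++ xs.filter (fun p => decide (pvPriority hps mps p = 2))) := by
  induction xs generalizing h m l with
  | nil => simp
  | cons x xs ih =>
    simp only [List.foldl_cons]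
    by_cases hh : (hps.any (fun hp => hp == PySem.Str.lower x || PySem.Str.isIn hp (PySem.Str.lower x) || PySem.Str.isIn (PySem.Str.lower x) hp)) = true
    · have hk : pvPriority hps mps x = 0 := by unfold pvPriority; simp only [hh, if_true]
      simp only [hh, if_true, ih]
      simp [hk]
    · by_cases hm : (mps.any (fun mp => mp == PySem.Str.lower x || PySem.Str.isIn mp (PySem.Str.lower x))) = true
      · have hk : pvPriority hps mps x = 1 := by unfold pvPriority; simp only [hh, hm]; simp
        simp only [hh, hm, if_true, if_false, Bool.false_eq_true, ih]
        simp [hk]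
      · have hk : pvPriority hps mps x = 2 := by unfold pvPriority; simp only [hh, hm]; simp
        simp only [hh, hm, if_false, Bool.false_eq_true, ih]
        simp [hk]

-- ===== VERDICT (by name: the statement is the Claim_ definition above) =====
theorem prioritize_params_spec : Claim_equal_prioritize_params := by
  intro params hp mp _
  unfold Spec_prioritize_params
  rw [alt_eq_filters]
  unfold prioritize_params
  simp only []
  rw [foldl_buckets (hp.getD pvDefaultHigh) (mp.getD pvDefaultMedium) params [] [] []]
  simp
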